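-- pv_equiv track=rewrite | github.com/devincornell/doctable | doctable/docparser.py | merge_ngrams
-- ===== SOURCE A (Python) =====
-- def merge_ngrams(toks, ngrams, ngram_sep=' '):
--     '''Merges specified consecutive tokens into single tokens.
--     '''
--     new_toks = list()
--     ngram_starts = [ng[0] for ng in ngrams] # first word of every ngram
--     i = 0
--     while i < len(toks):
--         if toks[i] in ngram_starts: # match is possible
--             found_match = False
--             for ng in ngrams:
--                 zip_rng = zip(range(len(ng)), range(i,len(toks)))
--                 if all([ng[j]==toks[k] for j,k in zip_rng]):
--                     new_toks.append(ngram_sep.join(ng))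
--                     i += len(ng)
--                     found_match = True
--                     break
--             if not found_match:
--                 new_toks.append(toks[i])
--                 i += 1
--         else: # match is impossible
--             new_toks.append(toks[i])
--             i += 1
--     return new_toks
-- ===== SOURCE B (Python) =====
-- def merge_ngrams(toks, ngrams, ngram_sep=' '):
--     '''Merges specified consecutive tokens into single tokens.
--
--     Two passes: first build a table match_at giving, for each position,
--     the first ngram in the list matching there (comparison truncated at
--     the end of toks, as in the original); then consume the tokens using
--     the table.
--     '''
--     n = len(toks)
--     match_at = []
--     for i in range(n):
--         m = None
--         for ng in ngrams:
--             w = min(len(ng), n - i)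
--             if all(ng[j] == toks[i + j] for j in range(w)):
--                 m = ng
--                 break
--         match_at.append(m)
--     out = []
--     i = 0
--     while i < n:
--         ng = match_at[i]
--         if ng is None:
--             out.append(toks[i])
--             i += 1
--         else:
--             out.append(ngram_sep.join(ng))
--             i += len(ng)
--     return out
-- ===== Notes on version B (the rewrite author's own statement) =====
-- stated objective: alternative
-- what changed: Replaces the single while-loop with inline ngram_starts screening and inline matching by a precomputed match table (first matching ngram at every index) followed by a separate consuming pass over the table.
import Mathlib
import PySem

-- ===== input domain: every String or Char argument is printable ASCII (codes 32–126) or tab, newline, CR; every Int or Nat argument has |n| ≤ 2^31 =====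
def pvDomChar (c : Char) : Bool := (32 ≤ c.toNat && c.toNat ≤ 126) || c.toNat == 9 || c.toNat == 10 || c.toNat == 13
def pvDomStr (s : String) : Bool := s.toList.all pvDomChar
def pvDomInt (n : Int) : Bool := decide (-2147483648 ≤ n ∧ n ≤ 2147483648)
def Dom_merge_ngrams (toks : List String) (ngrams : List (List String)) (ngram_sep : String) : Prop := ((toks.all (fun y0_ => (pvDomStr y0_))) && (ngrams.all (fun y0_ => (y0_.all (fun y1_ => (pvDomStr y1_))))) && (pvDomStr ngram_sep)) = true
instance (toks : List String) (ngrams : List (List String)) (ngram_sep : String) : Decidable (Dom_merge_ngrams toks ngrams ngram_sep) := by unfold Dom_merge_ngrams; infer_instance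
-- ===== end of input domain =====

-- B replaces A's single while-loop (inline ngram_starts screening + inline matching) by a
-- precomputed first-match table plus a separate consuming pass; same cost, different decomposition.


-- ===== PORT A =====
-- all([ng[j]==toks[k] for j,k in zip(range(len(ng)), range(i,len(toks)))])
-- (indices produced by the ranges are in range at every call site, so getD never hits its default)
def pvMatchA (ng : List String) (toks : List String) (i : Nat) : Bool :=
  ((List.range ng.length).zip (List.range' i (toks.length - i))).all
    (fun jk => ng.getD jk.1 "" == toks.getD jk.2 "")

-- the 'while i < len(toks)' loop of A; fuel only makes it total (each step advances i by ≥ 1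
-- under Pre_, so fuel = len(toks) is never exhausted on admitted inputs)
def pvLoopA (toks : List String) (ngrams : List (List String)) (sep : String)
    (starts : List String) : Nat → Nat → List String → List String
  | 0, _, new_toks => new_toks
  | fuel+1, i, new_toks =>
    if i < toks.length then
      if starts.contains (toks.getD i "") then
        -- for ng in ngrams: … break  ≡ first ng whose comparison passes
        match ngrams.find? (fun ng => pvMatchA ng toks i) with
        | some ng => pvLoopA toks ngrams sep starts fuel (i + ng.length)
            (new_toks ++ [PySem.Str.join sep ng])
        | none => pvLoopA toks ngrams sep starts fuel (i + 1) (new_toks ++ [toks.getD i ""])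
      else pvLoopA toks ngrams sep starts fuel (i + 1) (new_toks ++ [toks.getD i ""])
    else new_toks

def merge_ngrams (toks : List String) (ngrams : List (List String)) (ngram_sep : String) : List String :=
  -- ngram_starts = [ng[0] for ng in ngrams]  (raises on an empty ngram: excluded by Pre_)
  let ngram_starts := ngrams.map (fun ng => ng.headD "")
  pvLoopA toks ngrams ngram_sep ngram_starts toks.length 0 []

-- ===== PORT B =====
-- w = min(len(ng), n - i); all(ng[j] == toks[i + j] for j in range(w))
-- (j and i + j are in range for j < w, so getD never hits its default)
def pvMatchB (ng : List String) (toks : List String) (i : Nat) : Bool :=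
  (List.range (min ng.length (toks.length - i))).all
    (fun j => ng.getD j "" == toks.getD (i + j) "")

-- consuming pass: while i < n, driven by the precomputed table
def pvConsumeB (toks : List String) (sep : String) (match_at : List (Option (List String))) :
    Nat → Nat → List String → List String
  | 0, _, out => out
  | fuel+1, i, out =>
    if i < toks.length then
      match match_at.getD i none with
      | none => pvConsumeB toks sep match_at fuel (i + 1) (out ++ [toks.getD i ""])
      | some ng => pvConsumeB toks sep match_at fuel (i + ng.length)
          (out ++ [PySem.Str.join sep ng])
    else out

def merge_ngrams_alt (toks : List String) (ngrams : List (List String)) (ngram_sep : String) : List String :=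
  let match_at := (List.range toks.length).map
    (fun i => ngrams.find? (fun ng => pvMatchB ng toks i))
  pvConsumeB toks ngram_sep match_at toks.length 0 []

-- ===== PRECONDITION & SPEC =====
-- Pre_ excludes inputs containing an empty ngram: on those A raises IndexError (ng[0]).
def Pre_merge_ngrams (toks : List String) (ngrams : List (List String)) (ngram_sep : String) : Prop :=
  ∀ ng ∈ ngrams, ng ≠ []
instance (toks : List String) (ngrams : List (List String)) (ngram_sep : String) : Decidable (Pre_merge_ngrams toks ngrams ngram_sep) := by unfold Pre_merge_ngrams; infer_instance

def pvWitness_merge_ngrams : List String × List (List String) × String :=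
  (["new", "york", "city", "is", "big"], [["new", "york"], ["york", "city"]], "_")

def Spec_merge_ngrams (toks : List String) (ngrams : List (List String)) (ngram_sep : String) (out : List String) : Prop := out = merge_ngrams_alt toks ngrams ngram_sep
instance (toks : List String) (ngrams : List (List String)) (ngram_sep : String) (out : List String) : Decidable (Spec_merge_ngrams toks ngrams ngram_sep out) := by unfold Spec_merge_ngrams; infer_instance

-- ===== CLAIM (what is proved, stated in full; the proofs are below) =====
def Claim_equal_merge_ngrams : Prop := ∀ (toks : List String) (ngrams : List (List String)) (ngram_sep : String), Dom_merge_ngrams toks ngrams ngram_sep → Pre_merge_ngrams toks ngrams ngram_sep → Spec_merge_ngrams toks ngrams ngram_sep (merge_ngrams toks ngrams ngram_sep)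

-- ===== LEMMAS AND PROOFS =====

-- A's zip-of-ranges comparison equals B's single-range comparison.
lemma pvMatch_eq (ng toks : List String) (i : Nat) :
    pvMatchA ng toks i = pvMatchB ng toks i := by
  unfold pvMatchA pvMatchB
  rw [Bool.eq_iff_iff]
  simp only [List.all_eq_true, List.mem_iff_getElem]
  constructor
  · rintro h j ⟨k, hk, hj⟩
    simp only [List.length_range] at hk
    have hb : k < ((List.range ng.length).zip (List.range' i (toks.length - i))).length := by
      simp [List.length_zip]; omega
    have := h ((List.range ng.length).zip (List.range' i (toks.length - i)))[k] ⟨k, hb, rfl⟩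
    simp only [List.getElem_zip, List.getElem_range, List.getElem_range'] at this
    subst hj
    simpa [List.getElem_range, Nat.add_comm i k] using this
  · rintro h p ⟨k, hk, hp⟩
    simp only [List.length_zip, List.length_range, List.length_range', lt_min_iff] at hk
    have hb : k < (List.range (min ng.length (toks.length - i))).length := by
      simp; omega
    have := h (List.range (min ng.length (toks.length - i)))[k] ⟨k, hb, rfl⟩
    simp only [List.getElem_range] at this
    subst hp
    simpa [List.getElem_zip, List.getElem_range, List.getElem_range',
      Nat.add_comm i k] using this

-- If toks[i] is not an ngram start, no ngram matches at i (ngrams all nonempty).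
lemma find?_eq_none_of_not_start (toks : List String) (ngrams : List (List String)) (i : Nat)
    (hi : i < toks.length) (hne : ∀ ng ∈ ngrams, ng ≠ [])
    (hc : (ngrams.map (fun ng => ng.headD "")).contains (toks.getD i "") = false) :
    ngrams.find? (fun ng => pvMatchB ng toks i) = none := by
  rw [List.find?_eq_none]
  intro ng hng
  obtain ⟨s, tl, rfl⟩ := List.ne_nil_iff_exists_cons.mp (hne ng hng)
  have hmem : toks.getD i "" ∉ ngrams.map (fun ng => ng.headD "") := by
    intro h
    rw [← List.contains_iff_mem] at h
    rw [hc] at h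
    exact Bool.false_ne_true h
  have hs : s ≠ toks.getD i "" := by
    intro h
    exact hmem (List.mem_map.mpr ⟨s :: tl, hng, h⟩)
  simp only [pvMatchB, List.all_eq_true]
  intro hall
  have h0 := hall 0 (List.mem_range.mpr (by simp; omega))
  simp only [List.getD_cons_zero, Nat.add_zero, beq_iff_eq] at h0
  exact hs h0

-- The table entry at i is the recomputed first match.
lemma table_getD (toks : List String) (ngrams : List (List String)) (i : Nat)
    (hi : i < toks.length) :
    ((List.range toks.length).map
      (fun j => ngrams.find? (fun ng => pvMatchB ng toks j))).getD i none
    = ngrams.find? (fun ng => pvMatchB ng toks i) := by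
  rw [List.getD_eq_getElem?_getD, List.getElem?_eq_getElem (by simpa using hi)]
  simp

-- Loop invariant: the two loops agree from any state.
lemma loop_eq (toks : List String) (ngrams : List (List String)) (sep : String)
    (hne : ∀ ng ∈ ngrams, ng ≠ []) :
    ∀ (fuel i : Nat) (acc : List String),
      pvLoopA toks ngrams sep (ngrams.map (fun ng => ng.headD "")) fuel i acc
      = pvConsumeB toks sep ((List.range toks.length).map
          (fun j => ngrams.find? (fun ng => pvMatchB ng toks j))) fuel i acc := by
  intro fuel
  induction fuel with
  | zero => intro i acc; rfl
  | succ n ih =>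
    intro i acc
    rw [pvLoopA, pvConsumeB]
    by_cases hi : i < toks.length
    · simp only [hi, if_true]
      rw [table_getD toks ngrams i hi]
      have hfind : ngrams.find? (fun ng => pvMatchA ng toks i)
          = ngrams.find? (fun ng => pvMatchB ng toks i) := by
        have : (fun ng => pvMatchA ng toks i) = (fun ng => pvMatchB ng toks i) :=
          funext (fun ng => pvMatch_eq ng toks i)
        rw [this]
      by_cases hc : (ngrams.map (fun ng => ng.headD "")).contains (toks.getD i "") = true
      · simp only [hc, if_true, hfind]
        cases ngrams.find? (fun ng => pvMatchB ng toks i) with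
        | none => exact ih _ _
        | some ng => exact ih _ _
      · have hc' : (ngrams.map (fun ng => ng.headD "")).contains (toks.getD i "") = false :=
          Bool.eq_false_iff.mpr hc
        rw [find?_eq_none_of_not_start toks ngrams i hi hne hc']
        simp only [hc', Bool.false_eq_true, if_false]
        exact ih _ _
    · simp [hi]

-- ===== VERDICT (by name: the statement is the Claim_ definition above) =====
theorem merge_ngrams_spec : Claim_equal_merge_ngrams := by
  intro toks ngrams ngram_sep _ hpre
  unfold Spec_merge_ngrams merge_ngrams merge_ngrams_alt
  exact loop_eq toks ngrams ngram_sep hpre toks.length 0 []
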